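-- pv_equiv track=rewrite | github.com/Vivekyadv/450-DSA | 1. Array/30. Smallest subarray with sum greater than x .py | solve
-- ===== SOURCE A (Python) =====
-- def solve(arr, val):
--     n = len(arr)
--     lenSubArr = n + 1
--     for i in range(n):
--         currSum = 0
--         for j in range(i, n):
--             currSum += arr[j]
--             if currSum > val:
--                 lenSubArr = min(lenSubArr, j - i + 1)
--     return lenSubArr
-- ===== SOURCE B (Python) =====
-- def solve(arr, val):
--     n = len(arr)
--     for L in range(1, n + 1):
--         s = sum(arr[:L])
--         if s > val:
--             return L
--         for j in range(L, n):
--             s += arr[j] - arr[j - L]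
--             if s > val:
--                 return L
--     return n + 1
-- ===== Notes on version B (the rewrite author's own statement) =====
-- stated objective: alternative
-- what changed: A takes the minimum over all O(n^2) (start,end) pairs with a running sum per start; B instead scans candidate lengths in increasing order, testing each length with one sliding-window pass and returning at the first length that has a window with sum > val.
import Mathlib
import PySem

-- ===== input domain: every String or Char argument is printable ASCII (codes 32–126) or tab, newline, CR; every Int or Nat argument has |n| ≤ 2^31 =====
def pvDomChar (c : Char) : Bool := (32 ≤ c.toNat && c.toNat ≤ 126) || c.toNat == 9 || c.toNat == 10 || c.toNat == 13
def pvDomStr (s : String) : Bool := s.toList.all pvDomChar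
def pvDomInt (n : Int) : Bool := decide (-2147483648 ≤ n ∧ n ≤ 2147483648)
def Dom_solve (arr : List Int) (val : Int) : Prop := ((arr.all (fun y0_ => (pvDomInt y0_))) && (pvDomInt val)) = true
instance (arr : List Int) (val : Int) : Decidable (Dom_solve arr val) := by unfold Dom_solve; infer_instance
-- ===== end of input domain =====

-- B replaces A's all-pairs running-sum minimum by a per-length sliding-window scan with
-- early return at the first window length whose sum exceeds val (alternative decomposition).

-- ===== PORT A =====
-- inner loop of A: for j in range(i, n): currSum += arr[j]; if currSum > val: lenSubArr = min(...)
def innA (arr : List Int) (val i : Int) (js : List Int) (st : Int × Int) : Int × Int :=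
  js.foldl (fun st j =>
    let c := st.1 + PySem.List.pyGetD arr j 0
    (c, if val < c then min st.2 (j - i + 1) else st.2)) st

def solve (arr : List Int) (val : Int) : Int :=
  (PySem.List.pyRange 0 (arr.length : Int) 1).foldl
    (fun lenSubArr i =>
      (innA arr val i (PySem.List.pyRange i (arr.length : Int) 1) (0, lenSubArr)).2)
    ((arr.length : Int) + 1)

-- ===== PORT B =====
-- inner loop of B: for j in range(L, n): s += arr[j] - arr[j-L]; if s > val: return L
def altInner (arr : List Int) (val L : Int) : List Int → Int → Bool
  | [], _ => false
  | j :: rest, s =>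
      let s' := s + PySem.List.pyGetD arr j 0 - PySem.List.pyGetD arr (j - L) 0
      if val < s' then true else altInner arr val L rest s'

-- outer loop of B: for L in range(1, n+1) with the two early returns
def altOuter (arr : List Int) (val : Int) : List Int → Int
  | [] => (arr.length : Int) + 1
  | L :: rest =>
      let s := (PySem.List.slice arr none (some L)).sum
      if val < s then L
      else if altInner arr val L (PySem.List.pyRange L (arr.length : Int) 1) s then L
      else altOuter arr val rest

def solve_alt (arr : List Int) (val : Int) : Int :=
  altOuter arr val (PySem.List.pyRange 1 ((arr.length : Int) + 1) 1)

-- ===== PRECONDITION & SPEC =====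
def Spec_solve (arr : List Int) (val : Int) (out : Int) : Prop := out = solve_alt arr val
instance (arr : List Int) (val : Int) (out : Int) : Decidable (Spec_solve arr val out) := by unfold Spec_solve; infer_instance

-- ===== CLAIM (what is proved, stated in full; the proofs are below) =====
def Claim_equal_solve : Prop := ∀ (arr : List Int) (val : Int), Dom_solve arr val → Spec_solve arr val (solve arr val)

-- ===== LEMMAS AND PROOFS =====

-- sum of the window of length L starting at index i
def win (arr : List Int) (i L : Nat) : Int := ((arr.drop i).take L).sum

lemma win_succ_right (arr : List Int) (i L : Nat) (h : i + L < arr.length) :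
    win arr i (L + 1) = win arr i L + arr.getD (i + L) 0 := by
  unfold win
  have hL : L < (arr.drop i).length := by simp; omega
  rw [List.take_add_one]
  have : (arr.drop i)[L]? = some arr[i + L] := by
    rw [List.getElem?_drop]
    exact List.getElem?_eq_getElem h
  rw [this]
  simp [List.getD_eq_getElem?_getD, List.getElem?_eq_getElem h]

lemma win_succ_left (arr : List Int) (i L : Nat) (h : i < arr.length) :
    win arr i (L + 1) = arr.getD i 0 + win arr (i + 1) L := by
  have hdrop : arr.drop i = arr[i] :: arr.drop (i + 1) := List.drop_eq_getElem_cons h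
  calc win arr i (L + 1) = (List.take (L + 1) (arr[i] :: arr.drop (i + 1))).sum := by
        rw [win, hdrop]
    _ = arr[i] + (List.take L (arr.drop (i + 1))).sum := by
        rw [List.take_succ_cons, List.sum_cons]
    _ = arr.getD i 0 + win arr (i + 1) L := by
        rw [win, List.getD_eq_getElem?_getD, List.getElem?_eq_getElem h, Option.getD_some]

lemma win_slide (arr : List Int) (i L : Nat) (h : i + L < arr.length) :
    win arr (i + 1) L = win arr i L + arr.getD (i + L) 0 - arr.getD i 0 := by
  have h1 := win_succ_right arr i L h
  have h2 := win_succ_left arr i L (by omega)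
  omega

-- generic nested "min over qualifying pairs" fold
def nfold {β γ : Type} (g : β → List γ) (p : β → γ → Bool) (f : β → γ → Int)
    (l : List β) (m : Int) : Int :=
  l.foldl (fun m i => (g i).foldl (fun m x => if p i x then min m (f i x) else m) m) m

lemma foldl_ifmin {γ : Type} (p : γ → Bool) (f : γ → Int) :
    ∀ (l : List γ) (m : Int),
      (l.foldl (fun m x => if p x then min m (f x) else m) m ≤ m)
      ∧ (l.foldl (fun m x => if p x then min m (f x) else m) m = m
          ∨ ∃ x ∈ l, p x ∧ l.foldl (fun m x => if p x then min m (f x) else m) m = f x)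
      ∧ (∀ x ∈ l, p x → l.foldl (fun m x => if p x then min m (f x) else m) m ≤ f x) := by
  intro l
  induction l with
  | nil => intro m; simp
  | cons x t ih =>
    intro m
    have hstep : (x :: t).foldl (fun m x => if p x then min m (f x) else m) m
        = t.foldl (fun m x => if p x then min m (f x) else m) (if p x then min m (f x) else m) := by
      simp [List.foldl_cons]
    obtain ⟨ih1, ih2, ih3⟩ := ih (if p x then min m (f x) else m)
    refine ⟨?_, ?_, ?_⟩
    · rw [hstep]
      refine le_trans ih1 ?_
      split <;> simp
    · rw [hstep]
      rcases ih2 with h | ⟨y, hy, hpy, hres⟩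
      · by_cases hpx : p x = true
        · rw [h, if_pos hpx]
          rcases min_choice m (f x) with hm | hm
          · left; exact hm
          · right; exact ⟨x, List.mem_cons_self, hpx, hm⟩
        · left; rw [h, if_neg hpx]
      · right; exact ⟨y, List.mem_cons_of_mem _ hy, hpy, hres⟩
    · intro y hy hpy
      rw [hstep]
      rcases List.mem_cons.mp hy with rfl | hyt
      · refine le_trans ih1 ?_
        simp [hpy]
      · exact ih3 y hyt hpy
  

lemma nfold_spec {β γ : Type} (g : β → List γ) (p : β → γ → Bool) (f : β → γ → Int) :
    ∀ (l : List β) (m : Int),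
      nfold g p f l m ≤ m
      ∧ (nfold g p f l m = m ∨ ∃ i ∈ l, ∃ x ∈ g i, p i x ∧ nfold g p f l m = f i x)
      ∧ (∀ i ∈ l, ∀ x ∈ g i, p i x → nfold g p f l m ≤ f i x) := by
  intro l
  induction l with
  | nil => intro m; simp [nfold]
  | cons i t ih =>
    intro m
    have hstep : nfold g p f (i :: t) m
        = nfold g p f t ((g i).foldl (fun m x => if p i x then min m (f i x) else m) m) := by
      simp [nfold, List.foldl_cons]
    obtain ⟨h1, h2, h3⟩ := foldl_ifmin (p i) (f i) (g i) m
    obtain ⟨ih1, ih2, ih3⟩ := ih ((g i).foldl (fun m x => if p i x then min m (f i x) else m) m)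
    refine ⟨?_, ?_, ?_⟩
    · rw [hstep]; exact le_trans ih1 h1
    · rw [hstep]
      rcases ih2 with h | ⟨i', hi', x, hx, hpx, hres⟩
      · rcases h2 with h' | ⟨x, hx, hpx, hres⟩
        · left; rw [h, h']
        · right; exact ⟨i, List.mem_cons_self, x, hx, hpx, by rw [h, hres]⟩
      · right; exact ⟨i', List.mem_cons_of_mem _ hi', x, hx, hpx, hres⟩
    · intro i' hi' x hx hpx
      rw [hstep]
      rcases List.mem_cons.mp hi' with rfl | hit
      · exact le_trans ih1 (h3 x hx hpx)
      · exact ih3 i' hit x hx hpx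

-- A's inner loop computes the running-sum-free fold over window end positions
lemma innA_spec (arr : List Int) (val : Int) (i : Nat) :
    ∀ (cnt j0 : Nat), i ≤ j0 → j0 + cnt = arr.length → ∀ (m : Int),
      (innA arr val (i : Int) (PySem.List.pyRange (j0 : Int) (arr.length : Int) 1)
        (win arr i (j0 - i), m)).2
      = (List.range' j0 cnt).foldl
          (fun m j => if val < win arr i (j - i + 1) then min m ((j : Int) - (i : Int) + 1) else m) m := by
  intro cnt
  induction cnt with
  | zero =>
    intro j0 hij h m
    rw [PySem.List.pyRange_one_eq_nil (by omega : (arr.length : Int) ≤ (j0 : Int))]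
    simp [innA]
  | succ cnt ih =>
    intro j0 hij h m
    rw [PySem.List.pyRange_one_cons (by omega : (j0 : Int) < (arr.length : Int))]
    have hcast : (j0 : Int) + 1 = ((j0 + 1 : Nat) : Int) := by push_cast; ring
    have hsum : win arr i (j0 - i) + PySem.List.pyGetD arr (j0 : Int) 0 = win arr i (j0 - i + 1) := by
      rw [PySem.List.pyGetD_natCast]
      have := win_succ_right arr i (j0 - i) (by omega)
      have hidx : i + (j0 - i) = j0 := by omega
      rw [hidx] at this
      simp [List.getD_eq_getElem?_getD] at this ⊢
      omega
    have hfold : innA arr val (i : Int)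
          ((j0 : Int) :: PySem.List.pyRange ((j0 : Int) + 1) (arr.length : Int) 1)
          (win arr i (j0 - i), m)
        = innA arr val (i : Int) (PySem.List.pyRange ((j0 : Int) + 1) (arr.length : Int) 1)
          (win arr i (j0 - i + 1),
            if val < win arr i (j0 - i + 1) then min m ((j0 : Int) - (i : Int) + 1) else m) := by
      simp only [innA, List.foldl_cons, hsum]
    rw [hfold, hcast]
    have h1 : (j0 + 1) - i = (j0 - i) + 1 := by omega
    rw [← h1]
    rw [ih (j0 + 1) (by omega) (by omega)]
    rw [List.range'_succ]
    simp only [List.foldl_cons, h1]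

-- A's whole computation as a nested Nat-indexed fold
lemma solve_eq_nfold (arr : List Int) (val : Int) :
    solve arr val
      = nfold (fun i => List.range' i (arr.length - i))
          (fun i j => decide (val < win arr i (j - i + 1)))
          (fun i j => (j : Int) - (i : Int) + 1)
          (List.range arr.length) ((arr.length : Int) + 1) := by
  unfold solve nfold
  rw [PySem.List.pyRange_zero_nat, List.foldl_map]
  apply PySem.List.foldl_congr_mem
  intro m i hi
  have hin : i < arr.length := List.mem_range.mp hi
  have h0 : win arr i (i - i) = 0 := by simp [win]
  have := innA_spec arr val i (arr.length - i) i (le_refl i) (by omega) m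
  rw [h0] at this
  rw [this]
  apply PySem.List.foldl_congr_mem
  intro acc j hj
  by_cases hc : val < win arr i (j - i + 1) <;> simp [hc]

-- B's good-length test
def goodB (arr : List Int) (val : Int) (L : Nat) : Bool :=
  decide (∃ i < arr.length + 1 - L, val < win arr i L)

-- B's inner loop tests the windows of length L starting at 1..n-L
lemma altInner_spec (arr : List Int) (val : Int) (L : Nat) :
    ∀ (cnt j0 : Nat), L ≤ j0 → j0 + cnt = arr.length →
      altInner arr val (L : Int) (PySem.List.pyRange (j0 : Int) (arr.length : Int) 1)
        (win arr (j0 - L) L)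
      = (List.range' j0 cnt).any (fun j => decide (val < win arr (j - L + 1) L)) := by
  intro cnt
  induction cnt with
  | zero =>
    intro j0 hLj h
    rw [PySem.List.pyRange_one_eq_nil (by omega : (arr.length : Int) ≤ (j0 : Int))]
    simp [altInner]
  | succ cnt ih =>
    intro j0 hLj h
    rw [PySem.List.pyRange_one_cons (by omega : (j0 : Int) < (arr.length : Int))]
    have hslide : win arr (j0 - L) L + PySem.List.pyGetD arr (j0 : Int) 0
          - PySem.List.pyGetD arr ((j0 : Int) - (L : Int)) 0 = win arr (j0 - L + 1) L := by
      have hc1 : (j0 : Int) - (L : Int) = ((j0 - L : Nat) : Int) := by push_cast [hLj]; ring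
      rw [hc1, PySem.List.pyGetD_natCast, PySem.List.pyGetD_natCast]
      have := win_slide arr (j0 - L) L (by omega)
      have hidx : (j0 - L) + L = j0 := by omega
      rw [hidx] at this
      omega
    show (if val < win arr (j0 - L) L + PySem.List.pyGetD arr (j0 : Int) 0
            - PySem.List.pyGetD arr ((j0 : Int) - (L : Int)) 0 then true
          else altInner arr val (L : Int) (PySem.List.pyRange ((j0 : Int) + 1) (arr.length : Int) 1)
            (win arr (j0 - L) L + PySem.List.pyGetD arr (j0 : Int) 0
              - PySem.List.pyGetD arr ((j0 : Int) - (L : Int)) 0)) = _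
    rw [hslide]
    rw [List.range'_succ]
    by_cases hc : val < win arr (j0 - L + 1) L
    · simp [hc]
    · have hcast : (j0 : Int) + 1 = ((j0 + 1 : Nat) : Int) := by push_cast; ring
      have h1 : (j0 + 1) - L = (j0 - L) + 1 := by omega
      simp only [hc, List.any_cons]
      rw [hcast, ← h1, ih (j0 + 1) (by omega) (by omega)]
      simp

-- B's per-length check (initial window plus the sliding scan) decides goodB
lemma altCheck_iff (arr : List Int) (val : Int) (L : Nat) (hL : 1 ≤ L) (hLn : L ≤ arr.length) :
    ((decide (val < win arr 0 L))
      || altInner arr val (L : Int) (PySem.List.pyRange (L : Int) (arr.length : Int) 1)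
           (win arr 0 L))
      = goodB arr val L := by
  have hinner := altInner_spec arr val L (arr.length - L) L (le_refl L) (by omega)
  rw [Nat.sub_self] at hinner
  rw [hinner]
  unfold goodB
  apply Bool.eq_iff_iff.mpr
  simp only [Bool.or_eq_true, decide_eq_true_eq, List.any_eq_true, List.mem_range'_1]
  constructor
  · rintro (h | ⟨j, ⟨hj1, hj2⟩, hj3⟩)
    · exact ⟨0, by omega, h⟩
    · exact ⟨j - L + 1, by omega, hj3⟩
  · rintro ⟨i, hi, hwin⟩
    by_cases hi0 : i = 0
    · left; rw [hi0] at hwin; exact hwin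
    · right
      refine ⟨i + L - 1, ⟨by omega, by omega⟩, ?_⟩
      have heq : (i + L - 1) - L + 1 = i := by omega
      rw [heq]
      simpa using hwin

-- first good length in range' via find?
lemma find?_range'_least {p : Nat → Bool} :
    ∀ (c s a : Nat), List.find? p (List.range' s c) = some a →
      p a = true ∧ s ≤ a ∧ a < s + c ∧ ∀ x, s ≤ x → x < a → p x = false := by
  intro c
  induction c with
  | zero => intro s a h; simp at h
  | succ c ih =>
    intro s a h
    rw [List.range'_succ] at h
    by_cases hp : p s
    · rw [List.find?_cons_of_pos hp] at h
      cases h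
      exact ⟨hp, le_refl _, by omega, fun x h1 h2 => by omega⟩
    · rw [List.find?_cons_of_neg (by simp [hp])] at h
      obtain ⟨h1, h2, h3, h4⟩ := ih (s + 1) a h
      refine ⟨h1, by omega, by omega, ?_⟩
      intro x hx1 hx2
      by_cases hxs : x = s
      · rw [hxs]; exact Bool.eq_false_iff.mpr hp
      · exact h4 x (by omega) hx2

-- B returns the first good length, else n+1
lemma altOuter_spec (arr : List Int) (val : Int) :
    ∀ (cnt L0 : Nat), 1 ≤ L0 → L0 + cnt = arr.length + 1 →
      altOuter arr val (PySem.List.pyRange (L0 : Int) ((arr.length : Int) + 1) 1)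
      = (match List.find? (goodB arr val) (List.range' L0 cnt) with
          | some L => (L : Int)
          | none => (arr.length : Int) + 1) := by
  intro cnt
  induction cnt with
  | zero =>
    intro L0 h1 h2
    rw [PySem.List.pyRange_one_eq_nil (by omega : ((arr.length : Int) + 1) ≤ (L0 : Int))]
    rw [List.range'_zero, List.find?_nil]
    rfl
  | succ cnt ih =>
    intro L0 h1 h2
    rw [PySem.List.pyRange_one_cons (by omega : (L0 : Int) < (arr.length : Int) + 1)]
    show (let s := (PySem.List.slice arr none (some (L0 : Int))).sum
          if val < s then (L0 : Int)
          else if altInner arr val (L0 : Int) (PySem.List.pyRange (L0 : Int) (arr.length : Int) 1) s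
            then (L0 : Int)
            else altOuter arr val (PySem.List.pyRange ((L0 : Int) + 1) ((arr.length : Int) + 1) 1)) = _
    have hsl : (PySem.List.slice arr none (some (L0 : Int))).sum = win arr 0 L0 := by
      rw [PySem.List.slice_to_natCast]; simp [win]
    have hcheck := altCheck_iff arr val L0 h1 (by omega)
    rw [List.range'_succ]
    simp only [hsl]
    by_cases hgood : goodB arr val L0 = true
    · rw [List.find?_cons_of_pos hgood]
      rw [hgood] at hcheck
      rcases Bool.or_eq_true_iff.mp hcheck with hc | hc
      · simp only [decide_eq_true_eq] at hc
        simp [hc]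
      · by_cases hc0 : val < win arr 0 L0
        · simp [hc0]
        · simp [hc0, hc]
    · rw [List.find?_cons_of_neg (by simp [hgood])]
      rw [Bool.eq_false_iff.mpr hgood] at hcheck
      rcases Bool.or_eq_false_iff.mp hcheck with ⟨hc1, hc2⟩
      simp only [decide_eq_false_iff_not] at hc1
      have hcast : (L0 : Int) + 1 = ((L0 + 1 : Nat) : Int) := by push_cast; ring
      rw [if_neg hc1, hc2, if_neg (by simp), hcast, ih (L0 + 1) (by omega) (by omega)]

-- ===== VERDICT (by name: the statement is the Claim_ definition above) =====
theorem solve_spec : Claim_equal_solve := by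
  unfold Claim_equal_solve Spec_solve
  intro arr val _
  have hB : solve_alt arr val
      = (match List.find? (goodB arr val) (List.range' 1 arr.length) with
          | some L => (L : Int)
          | none => (arr.length : Int) + 1) := by
    unfold solve_alt
    exact altOuter_spec arr val arr.length 1 (le_refl 1) (by omega)
  have hA := solve_eq_nfold arr val
  obtain ⟨hA1, hA2, hA3⟩ := nfold_spec (fun i => List.range' i (arr.length - i))
      (fun i j => decide (val < win arr i (j - i + 1)))
      (fun i j => (j : Int) - (i : Int) + 1)
      (List.range arr.length) ((arr.length : Int) + 1)
  rw [hA, hB]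
  cases hfind : List.find? (goodB arr val) (List.range' 1 arr.length) with
  | none =>
    have hnone := List.find?_eq_none.mp hfind
    rcases hA2 with h | ⟨i, hi, j, hj, hp, hres⟩
    · exact h
    · exfalso
      have hi' : i < arr.length := List.mem_range.mp hi
      obtain ⟨hij, hjn⟩ := List.mem_range'_1.mp hj
      have hjn' : j < arr.length := by omega
      have hLmem : (j - i + 1) ∈ List.range' 1 arr.length := by
        apply List.mem_range'_1.mpr; omega
      have := hnone _ hLmem
      apply this
      unfold goodB
      simp only [decide_eq_true_eq] at hp ⊢
      exact ⟨i, by omega, hp⟩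
  | some L0 =>
    obtain ⟨hgood, hge, hlt, hleast⟩ := find?_range'_least arr.length 1 L0 hfind
    unfold goodB at hgood
    simp only [decide_eq_true_eq] at hgood
    obtain ⟨i0, hi0, hwin0⟩ := hgood
    -- the qualifying pair (i0, i0 + L0 - 1) witnesses length L0 in A's fold
    have hub : nfold (fun i => List.range' i (arr.length - i))
        (fun i j => decide (val < win arr i (j - i + 1)))
        (fun i j => (j : Int) - (i : Int) + 1)
        (List.range arr.length) ((arr.length : Int) + 1) ≤ (L0 : Int) := by
      have hji : i0 + L0 - 1 ∈ List.range' i0 (arr.length - i0) := by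
        apply List.mem_range'_1.mpr; omega
      have himem : i0 ∈ List.range arr.length := List.mem_range.mpr (by omega)
      have hpw : decide (val < win arr i0 ((i0 + L0 - 1) - i0 + 1)) = true := by
        have : (i0 + L0 - 1) - i0 + 1 = L0 := by omega
        rw [this]; exact decide_eq_true hwin0
      have := hA3 i0 himem (i0 + L0 - 1) hji hpw
      have hcast : ((i0 + L0 - 1 : Nat) : Int) - (i0 : Int) + 1 = (L0 : Int) := by
        push_cast [show 1 ≤ i0 + L0 by omega]
        omega
      rw [hcast] at this
      exact this
    rcases hA2 with h | ⟨i, hi, j, hj, hp, hres⟩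
    · exfalso
      rw [h] at hub
      omega
    · have hi' : i < arr.length := List.mem_range.mp hi
      obtain ⟨hij, hjn⟩ := List.mem_range'_1.mp hj
      have hjn' : j < arr.length := by omega
      simp only [decide_eq_true_eq] at hp
      -- the length A attains is a good length, hence ≥ L0
      have hgoodL : goodB arr val (j - i + 1) = true := by
        unfold goodB
        simp only [decide_eq_true_eq]
        exact ⟨i, by omega, hp⟩
      have hLge : L0 ≤ j - i + 1 := by
        by_contra hcon
        have hfalse := hleast (j - i + 1) (by omega) (by omega)
        rw [hgoodL] at hfalse
        exact Bool.noConfusion hfalse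
      have hcast : (j : Int) - (i : Int) + 1 = ((j - i + 1 : Nat) : Int) := by
        push_cast [hij]; ring
      rw [hres, hcast]
      have : (j - i + 1) = L0 := by
        rw [hres, hcast] at hub
        have := Int.ofNat_le.mp (by exact_mod_cast hub)
        omega
      rw [this]
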